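-- pv_equiv track=rewrite | github.com/WoobeenJeong/Rosalind | TextBook/BA3/ba3i.py | overlap
-- ===== SOURCE A (Python) =====
-- def count_overlap(prefix, suffix):
--     overlap_length = 0
--     for i in range(1, min(len(prefix), len(suffix))):
--         if prefix.endswith(suffix[:i]):
--             overlap_length = i
--     return overlap_length
--
-- def overlap(patterns):
--
--     overlap_dict = {}
--     max_overlap = 0
--
--     for prefix in patterns:
--         overlap_dict[prefix] = []
--         for suffix in patterns:
--             if prefix != suffix:
--                 overlap_length = count_overlap(prefix, suffix)
--                 if overlap_length >= max_overlap:
--                     max_overlap = overlap_length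
--                     overlap_dict[prefix].append(suffix)
--
--     return overlap_dict
-- ===== SOURCE B (Python) =====
-- def overlap(patterns):
--     SEP = "\x00"
--
--     def prefix_function(s):
--         # standard KMP prefix (failure) function of s
--         f = [0] * len(s)
--         k = 0
--         for i in range(1, len(s)):
--             while k > 0 and s[i] != s[k]:
--                 k = f[k - 1]
--             if s[i] == s[k]:
--                 k += 1
--             f[i] = k
--         return f
--
--     def kmp_overlap(prefix, suffix):
--         # longest i < min(len(prefix), len(suffix)) with prefix.endswith(suffix[:i]),
--         # read off as the longest border of  suffix[:cap] + SEP + prefix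
--         m = min(len(prefix), len(suffix))
--         t = suffix[:max(m - 1, 0)]
--         if not t:
--             return 0
--         return prefix_function(t + SEP + prefix)[-1]
--
--     result = {}
--     max_overlap = 0
--     for prefix in patterns:
--         row = []
--         for suffix in patterns:
--             if prefix != suffix:
--                 k = kmp_overlap(prefix, suffix)
--                 if k >= max_overlap:
--                     max_overlap = k
--                     row.append(suffix)
--         result[prefix] = row
--     return result
-- ===== Notes on version B (the rewrite author's own statement) =====
-- stated objective: alternative
-- what changed: Each per-pair overlap is computed by the KMP prefix (failure) function of suffix[:min-1] + '\x00' + prefix and reading its last entry (longest border), replacing A's quadratic scan that calls endswith for every candidate length; the outer running-max traversal is kept.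
import Mathlib
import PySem

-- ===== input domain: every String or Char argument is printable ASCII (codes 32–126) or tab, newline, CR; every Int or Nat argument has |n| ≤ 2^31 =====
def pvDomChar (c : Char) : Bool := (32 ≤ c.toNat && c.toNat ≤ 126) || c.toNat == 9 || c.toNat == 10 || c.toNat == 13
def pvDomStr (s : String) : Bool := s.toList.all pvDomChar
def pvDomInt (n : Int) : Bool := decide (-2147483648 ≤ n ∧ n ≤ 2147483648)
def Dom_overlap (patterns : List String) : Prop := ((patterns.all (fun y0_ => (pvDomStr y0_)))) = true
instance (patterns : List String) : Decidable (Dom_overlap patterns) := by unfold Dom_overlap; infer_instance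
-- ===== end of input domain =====

-- B computes each per-pair overlap with the KMP prefix (failure) function of
-- suffix[:min-1] + '\x00' + prefix (its last entry is the longest border, i.e. the overlap),
-- instead of A's scan that calls endswith for every candidate length; same return value.

-- ===== PORT A =====
def countOverlapA (pre suf : String) : Int :=
  (PySem.List.pyRange 1 (min (PySem.Str.len pre) (PySem.Str.len suf)) 1).foldl
    (fun acc i =>
      if PySem.Str.endswith pre (PySem.Str.slice suf none (some i)) then i else acc) 0

def overlap (patterns : List String) : List (String × List String) :=
  (patterns.foldl
    (fun (st : PySem.Dict String (List String) × Int) pre =>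
      patterns.foldl
        (fun (st2 : PySem.Dict String (List String) × Int) suf =>
          if pre ≠ suf then
            let ol := countOverlapA pre suf
            if ol ≥ st2.2 then (st2.1.modify pre [] (· ++ [suf]), ol) else st2
          else st2)
        (st.1.insert pre [], st.2))
    (PySem.Dict.empty, 0)).1.items

-- ===== PORT B =====
-- the KMP inner loop 'while k > 0 and s[i] != s[k]: k = f[k-1]' (fuel = current k, which the
-- loop strictly decreases, so the fuel is never exhausted; s[·]/f[·] are in range on every
-- reached iteration, so getD is exact here)
def pfWhile (s : List Char) (f : List Nat) (c : Char) : Nat → Nat → Nat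
  | 0, k => k
  | fuel + 1, k =>
    if 0 < k ∧ c ≠ s.getD k ' ' then pfWhile s f c fuel (f.getD (k - 1) 0) else k

-- one iteration of the 'for i in range(1, len(s))' loop of prefix_function
def pfStep (s : List Char) (st : List Nat × Nat) (i : Nat) : List Nat × Nat :=
  let c := s.getD i ' '
  let k := pfWhile s st.1 c st.2 st.2
  let k2 := if c = s.getD k ' ' then k + 1 else k
  (st.1 ++ [k2], k2)

-- prefix_function(s): f[0] = 0, then the loop above (f is built left to right, exactly the
-- entries python has written so far)
def prefixFun (s : List Char) : List Nat :=
  if s.length = 0 then []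
  else ((List.range' 1 (s.length - 1)).foldl (pfStep s) ([0], 0)).1

-- kmp_overlap(prefix, suffix) of Source B ('not t' is emptiness of t; f[-1] is getLastD)
def kmpOverlap (pre suf : String) : Int :=
  let m := min (PySem.Str.len pre) (PySem.Str.len suf)
  let t := PySem.List.slice suf.toList none (some (max (m - 1) 0))
  if t = [] then 0
  else ((prefixFun (t ++ '\x00' :: pre.toList)).getLastD 0 : Int)

def overlap_alt (patterns : List String) : List (String × List String) :=
  (patterns.foldl
    (fun (st : PySem.Dict String (List String) × Int) pre =>
      let inner := patterns.foldl
        (fun (st2 : List String × Int) suf =>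
          if pre ≠ suf then
            let k := kmpOverlap pre suf
            if k ≥ st2.2 then (st2.1 ++ [suf], k) else st2
          else st2)
        ([], st.2)
      (st.1.insert pre inner.1, inner.2))
    (PySem.Dict.empty, 0)).1.items

-- ===== PRECONDITION & SPEC =====
def Spec_overlap (patterns : List String) (out : List (String × List String)) : Prop := out = overlap_alt patterns
instance (patterns : List String) (out : List (String × List String)) : Decidable (Spec_overlap patterns out) := by unfold Spec_overlap; infer_instance

-- ===== CLAIM (what is proved, stated in full; the proofs are below) =====
def Claim_equal_overlap : Prop := ∀ (patterns : List String), Dom_overlap patterns → Spec_overlap patterns (overlap patterns)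

-- ===== LEMMAS AND PROOFS =====

-- the longest proper border length of l (greatest b < |l| with l.take b a suffix of l)
def brd (l : List Char) : Nat := Nat.findGreatest (fun b => l.take b <:+ l) (l.length - 1)

lemma brd_lt (l : List Char) (h : l ≠ []) : brd l < l.length := by
  have h1 := Nat.findGreatest_le (P := fun b => l.take b <:+ l) (l.length - 1)
  have h2 : 0 < l.length := List.length_pos_iff.mpr h
  unfold brd; omega

lemma brd_suffix (l : List Char) : l.take (brd l) <:+ l := by
  unfold brd
  exact Nat.findGreatest_spec (P := fun b => l.take b <:+ l) (m := 0) (Nat.zero_le _)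
    (by simp)

lemma brd_greatest (l : List Char) (b : Nat) (hb : b < l.length) (hs : l.take b <:+ l) :
    b ≤ brd l := Nat.le_findGreatest (by omega) hs

lemma take_of_take (s : List Char) (b j : Nat) (h : b ≤ j) :
    (s.take j).take b = s.take b := by
  rw [List.take_take]; congr 1; omega

lemma brd_take_lt (s : List Char) (j : Nat) (h1 : 1 ≤ j) (h2 : j ≤ s.length) :
    brd (s.take j) < j := by
  have hne : s.take j ≠ [] := by
    intro h
    have h3 := congrArg List.length h
    rw [List.length_take] at h3
    simp only [List.length_nil] at h3
    omega
  have := brd_lt (s.take j) hne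
  rwa [List.length_take, Nat.min_eq_left h2] at this

lemma brd_take_suffix (s : List Char) (j : Nat) (h2 : j ≤ s.length) :
    s.take (brd (s.take j)) <:+ s.take j := by
  have h := brd_suffix (s.take j)
  rcases Nat.eq_zero_or_pos j with hj | hj
  · subst hj
    simp only [List.take_zero]
    have hb : brd ([] : List Char) = 0 := rfl
    rw [hb, List.take_zero]
  · rwa [take_of_take s _ j (by
      have := brd_take_lt s j hj h2; omega)] at h

lemma brd_take_greatest (s : List Char) (b j : Nat) (hb : b < j) (hj : j ≤ s.length)
    (hs : s.take b <:+ s.take j) : b ≤ brd (s.take j) := by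
  apply brd_greatest
  · simp [List.length_take]; omega
  · rwa [take_of_take s b j (by omega)]

-- xs ++ [a] is a suffix of ys ++ [c] iff xs is a suffix of ys and a = c
lemma concat_suffix_concat {α : Type} (xs ys : List α) (a c : α) :
    (xs ++ [a] <:+ ys ++ [c]) ↔ (xs <:+ ys ∧ a = c) := by
  constructor
  · rintro ⟨u, hu⟩
    rw [← List.append_assoc] at hu
    have h := List.append_inj_right' hu (by rfl)
    have h2 := List.append_inj_left' hu (by rfl)
    refine ⟨⟨u, h2⟩, by simpa using h⟩
  · rintro ⟨⟨u, rfl⟩, rfl⟩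
    exact ⟨u, by simp⟩

-- one-step border decomposition (K1)
lemma take_succ_suffix_iff (s : List Char) (b j : Nat) (hb : b < s.length) (hj : j < s.length) :
    (s.take (b + 1) <:+ s.take (j + 1)) ↔
      (s.take b <:+ s.take j ∧ s.getD b ' ' = s.getD j ' ') := by
  have hgb : s.getD b ' ' = s[b] := by
    simp [List.getD_eq_getElem?_getD, List.getElem?_eq_getElem hb]
  have hgj : s.getD j ' ' = s[j] := by
    simp [List.getD_eq_getElem?_getD, List.getElem?_eq_getElem hj]
  rw [List.take_succ_eq_append_getElem hb, List.take_succ_eq_append_getElem hj,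
    concat_suffix_concat, hgb, hgj]

-- border of a border (K2)
lemma suffix_take_trans (s : List Char) (b c j : Nat) (hbc : b ≤ c) (hcj : c ≤ j)
    (hj : j ≤ s.length) (h1 : s.take b <:+ s.take j) (h2 : s.take c <:+ s.take j) :
    s.take b <:+ s.take c := by
  rw [List.suffix_iff_eq_drop] at h1 h2
  simp only [List.length_take] at h1 h2
  have hb : min b s.length = b := by omega
  have hc : min c s.length = c := by omega
  have hjj : min j s.length = j := by omega
  rw [hb, hjj] at h1
  rw [hc, hjj] at h2
  have : (s.take c).drop (c - b) = s.take b := by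
    rw [h2, List.drop_drop, show j - c + (c - b) = j - b by omega]
    exact h1.symm
  rw [← this]
  exact List.drop_suffix _ _

-- correctness of the while loop (chain of failure links)
lemma pfWhile_spec (s : List Char) (f : List Nat) (j : Nat) (_hj1 : 1 ≤ j) (hjn : j < s.length)
    (hf : ∀ m, m < j → f.getD m 0 = brd (s.take (m + 1))) :
    ∀ fuel k, k ≤ fuel → k < j → s.take k <:+ s.take j →
    (∀ b, b < j → s.take b <:+ s.take j → s.getD b ' ' = s.getD j ' ' → b ≤ k) →
    (pfWhile s f (s.getD j ' ') fuel k < j ∧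
     s.take (pfWhile s f (s.getD j ' ') fuel k) <:+ s.take j ∧
     (∀ b, b < j → s.take b <:+ s.take j → s.getD b ' ' = s.getD j ' ' →
        b ≤ pfWhile s f (s.getD j ' ') fuel k) ∧
     (0 < pfWhile s f (s.getD j ' ') fuel k →
        s.getD (pfWhile s f (s.getD j ' ') fuel k) ' ' = s.getD j ' ')) := by
  intro fuel
  induction fuel with
  | zero =>
    intro k hk hkj hsuf hcand
    have : k = 0 := by omega
    subst this
    simp only [pfWhile]
    exact ⟨by omega, hsuf, hcand, by omega⟩
  | succ fuel ih =>
    intro k hk hkj hsuf hcand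
    simp only [pfWhile]
    by_cases h : 0 < k ∧ s.getD j ' ' ≠ s.getD k ' '
    · rw [if_pos h]
      have hks : k ≤ s.length := by omega
      have hknew : f.getD (k - 1) 0 = brd (s.take k) := by
        have := hf (k - 1) (by omega)
        rwa [Nat.sub_add_cancel h.1] at this
      rw [hknew]
      have hlt : brd (s.take k) < k := brd_take_lt s k h.1 hks
      apply ih
      · omega
      · omega
      · exact (brd_take_suffix s k hks).trans hsuf
      · intro b hbj hbs hbc
        have hbk : b ≤ k := hcand b hbj hbs hbc
        have hbk' : b < k := by
          rcases Nat.lt_or_ge b k with h' | h'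
          · exact h'
          · exfalso; have : b = k := by omega
            subst this; exact h.2 hbc.symm
        exact brd_take_greatest s b k hbk'
          (by omega) (suffix_take_trans s b k j (by omega) (by omega) (by omega) hbs hsuf)
    · rw [if_neg h]
      refine ⟨hkj, hsuf, hcand, ?_⟩
      intro hk0
      by_contra hne
      exact h ⟨hk0, fun he => hne he.symm⟩

-- one step of the prefix-function loop computes the next border value
lemma pfStep_brd (s : List Char) (j : Nat) (hj1 : 1 ≤ j) (hjn : j < s.length)
    (f : List Nat) (hf : ∀ m, m < j → f.getD m 0 = brd (s.take (m + 1))) :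
    (if s.getD j ' ' = s.getD (pfWhile s f (s.getD j ' ') (brd (s.take j)) (brd (s.take j))) ' '
     then pfWhile s f (s.getD j ' ') (brd (s.take j)) (brd (s.take j)) + 1
     else pfWhile s f (s.getD j ' ') (brd (s.take j)) (brd (s.take j)))
      = brd (s.take (j + 1)) := by
  have hjs : j ≤ s.length := by omega
  have hk0lt : brd (s.take j) < j := brd_take_lt s j hj1 hjs
  obtain ⟨hlt, hsuf, hcand, hexit⟩ :=
    pfWhile_spec s f j hj1 hjn hf (brd (s.take j)) (brd (s.take j)) le_rfl hk0lt
      (brd_take_suffix s j hjs)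
      (fun b hbj hbs _ => brd_take_greatest s b j hbj hjs hbs)
  set k' := pfWhile s f (s.getD j ' ') (brd (s.take j)) (brd (s.take j)) with hk'
  have hj1n : j + 1 ≤ s.length := by omega
  by_cases hc : s.getD j ' ' = s.getD k' ' '
  · rw [if_pos hc]
    have hle : k' + 1 ≤ brd (s.take (j + 1)) := by
      apply brd_take_greatest s (k' + 1) (j + 1) (by omega) hj1n
      exact (take_succ_suffix_iff s k' j (by omega) hjn).mpr ⟨hsuf, hc.symm⟩
    have hge : brd (s.take (j + 1)) ≤ k' + 1 := by
      rcases Nat.eq_zero_or_pos (brd (s.take (j + 1))) with hB | hB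
      · omega
      · obtain ⟨b', hb'⟩ : ∃ b', brd (s.take (j + 1)) = b' + 1 :=
          ⟨brd (s.take (j + 1)) - 1, by omega⟩
        have hBsuf := brd_take_suffix s (j + 1) hj1n
        have hBlt : brd (s.take (j + 1)) < j + 1 := brd_take_lt s (j + 1) (by omega) hj1n
        rw [hb'] at hBsuf hBlt
        obtain ⟨hbs, hbc⟩ := (take_succ_suffix_iff s b' j (by omega) hjn).mp hBsuf
        have := hcand b' (by omega) hbs hbc
        omega
    omega
  · rw [if_neg hc]
    have hk'0 : k' = 0 := by
      by_contra h0
      exact hc (hexit (by omega)).symm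
    rcases Nat.eq_zero_or_pos (brd (s.take (j + 1))) with hB | hB
    · omega
    · exfalso
      obtain ⟨b', hb'⟩ : ∃ b', brd (s.take (j + 1)) = b' + 1 :=
        ⟨brd (s.take (j + 1)) - 1, by omega⟩
      have hBsuf := brd_take_suffix s (j + 1) hj1n
      have hBlt : brd (s.take (j + 1)) < j + 1 := brd_take_lt s (j + 1) (by omega) hj1n
      rw [hb'] at hBsuf hBlt
      obtain ⟨hbs, hbc⟩ := (take_succ_suffix_iff s b' j (by omega) hjn).mp hBsuf
      have hb'k : b' ≤ k' := hcand b' (by omega) hbs hbc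
      have : b' = 0 := by omega
      subst this
      rw [hk'0] at hc
      exact hc hbc.symm

-- the table of border values of the prefixes s.take 1 … s.take (i+1)
def brdTable (s : List Char) (i : Nat) : List Nat :=
  (List.range (i + 1)).map (fun m => brd (s.take (m + 1)))

lemma brdTable_getD (s : List Char) (i m : Nat) (hm : m ≤ i) :
    (brdTable s i).getD m 0 = brd (s.take (m + 1))  := by
  unfold brdTable
  rw [List.getD_eq_getElem?_getD, List.getElem?_map, List.getElem?_range (by omega)]
  rfl

lemma brd_take_one (s : List Char) : brd (s.take 1) = 0 := by
  unfold brd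
  have : (s.take 1).length - 1 = 0 := by
    have := List.length_take_le 1 s; omega
  rw [this, Nat.findGreatest_zero]

-- loop invariant: after processing indices 1..i the fold carries exactly the border table
lemma fold_inv (s : List Char) (hs : s ≠ []) :
    ∀ i, i ≤ s.length - 1 →
      (List.range' 1 i).foldl (pfStep s) ([0], 0) = (brdTable s i, brd (s.take (i + 1))) := by
  intro i
  induction i with
  | zero =>
    intro _
    simp [brdTable, brd_take_one]
  | succ i ih =>
    intro hi
    have hlen : 0 < s.length := List.length_pos_iff.mpr hs
    rw [List.range'_1_concat, List.foldl_append, ih (by omega)]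
    simp only [List.foldl_cons, List.foldl_nil]
    unfold pfStep
    have hj1 : 1 ≤ 1 + i := by omega
    have hjn : 1 + i < s.length := by omega
    have hstep := pfStep_brd s (1 + i) hj1 hjn (brdTable s i)
      (fun m hm => brdTable_getD s i m (by omega))
    have hidx : 1 + i = i + 1 := by omega
    rw [hidx] at hstep
    simp only [hidx]
    rw [hstep]
    have htab : brdTable s i ++ [brd (s.take (i + 1 + 1))] = brdTable s (i + 1) := by
      unfold brdTable
      rw [List.range_succ (n := i + 1), List.map_append]
      simp
    rw [htab]

lemma prefixFun_last (s : List Char) (hs : s ≠ []) :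
    (prefixFun s).getLastD 0 = brd s := by
  have hlen : 0 < s.length := List.length_pos_iff.mpr hs
  unfold prefixFun
  rw [if_neg (by omega), fold_inv s hs (s.length - 1) le_rfl]
  show (brdTable s (s.length - 1)).getLastD 0 = brd s
  unfold brdTable
  rw [List.range_succ, List.map_append]
  simp only [List.map_cons, List.map_nil, List.getLastD_concat]
  congr 1
  rw [List.take_of_length_le (by omega)]

-- the separator occurs in t ++ c :: p only at position t.length
lemma sep_unique (t p : List Char) (c : Char) (hct : c ∉ t) (hcp : c ∉ p) :
    ∀ i, (t ++ c :: p)[i]? = some c → i = t.length := by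
  intro i hi
  rcases Nat.lt_trichotomy i t.length with h | h | h
  · rw [List.getElem?_append_left h] at hi
    exact absurd (List.mem_of_getElem? hi) hct
  · exact h
  · rw [List.getElem?_append_right (by omega)] at hi
    have h2 : i - t.length = (i - t.length - 1) + 1 := by omega
    rw [h2] at hi
    simp only [List.getElem?_cons_succ] at hi
    exact absurd (List.mem_of_getElem? hi) hcp

-- any suffix-prefix of t ++ c :: p stays inside t and p  (E1)
lemma sep_border_char (t p : List Char) (c : Char) (hct : c ∉ t) (hcp : c ∉ p)
    (b : Nat) (hb : b < (t ++ c :: p).length) (hs : (t ++ c :: p).take b <:+ (t ++ c :: p)) :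
    b ≤ t.length ∧ b ≤ p.length ∧ t.take b <:+ p := by
  set X := t ++ c :: p with hX
  have hn : X.length = t.length + 1 + p.length := by
    simp only [hX, List.length_append, List.length_cons]; omega
  have hdrop : X.take b = X.drop (X.length - b) := by
    have := List.suffix_iff_eq_drop.mp hs
    rw [List.length_take] at this
    rw [this]
    congr 1
    omega
  have hbt : b ≤ t.length := by
    by_contra hbt'
    have hbt : t.length < b := by omega
    have h1 : (X.take b)[t.length]? = X[t.length]? := List.getElem?_take_of_lt hbt
    have h2 : X[t.length]? = some c := by
      rw [hX, List.getElem?_append_right le_rfl]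
      simp
    have h3 : (X.drop (X.length - b))[t.length]? = X[X.length - b + t.length]? :=
      List.getElem?_drop
    have h4 : X[X.length - b + t.length]? = some c := by
      rw [← h3, ← hdrop, h1, h2]
    have := sep_unique t p c hct hcp _ h4
    omega
  have hbp : b ≤ p.length := by
    by_contra hbp'
    have hbp : p.length < b := by omega
    have hnb : X.length - b ≤ t.length := by omega
    have h3 : (X.drop (X.length - b))[t.length - (X.length - b)]? = X[X.length - b + (t.length - (X.length - b))]? :=
      List.getElem?_drop
    have hidx : X.length - b + (t.length - (X.length - b)) = t.length := by omega
    rw [hidx] at h3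
    have h2 : X[t.length]? = some c := by
      rw [hX, List.getElem?_append_right le_rfl]
      simp
    rw [h2, ← hdrop] at h3
    have hc : c ∈ X.take b := List.mem_of_getElem? h3
    rw [hX, List.take_append_of_le_length hbt] at hc
    exact hct (List.mem_of_mem_take hc)
  refine ⟨hbt, hbp, ?_⟩
  have h5 : X.take b = t.take b := by rw [hX, List.take_append_of_le_length hbt]
  have h6 : X.drop (X.length - b) = p.drop (p.length - b) := by
    have hX2 : X = (t ++ [c]) ++ p := by simp [hX]
    have hlen2 : X.length - b = (t ++ [c]).length + (p.length - b) := by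
      simp only [List.length_append, List.length_cons, List.length_nil]
      omega
    rw [hlen2, hX2, List.drop_append]
    simp
  rw [h5, h6] at hdrop
  rw [hdrop]
  exact List.drop_suffix _ _

-- conversely every overlap of t into p is a border of t ++ c :: p  (E2)
lemma sep_border_of_overlap (t p : List Char) (c : Char) (b : Nat) (hbt : b ≤ t.length)
    (hs : t.take b <:+ p) : (t ++ c :: p).take b <:+ (t ++ c :: p) := by
  rw [List.take_append_of_le_length hbt]
  exact hs.trans ((List.suffix_cons c p).trans (List.suffix_append t (c :: p)))

-- tiny congruence for findGreatest (predicates agreeing up to the bound)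
lemma findGreatest_congr' (P Q : Nat → Prop) [DecidablePred P] [DecidablePred Q] (N : Nat)
    (h : ∀ b, b ≤ N → (P b ↔ Q b)) : Nat.findGreatest P N = Nat.findGreatest Q N := by
  induction N with
  | zero => rfl
  | succ N ih =>
    rw [Nat.findGreatest_succ, Nat.findGreatest_succ]
    by_cases hP : P (N + 1)
    · rw [if_pos hP, if_pos ((h (N + 1) le_rfl).mp hP)]
    · rw [if_neg hP, if_neg (fun hQ => hP ((h (N + 1) le_rfl).mpr hQ))]
      exact ih (fun b hb => h b (by omega))

-- the longest border of t ++ c :: p is the longest overlap of t into p (separator argument)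
lemma sep_brd (t p : List Char) (c : Char) (hct : c ∉ t) (hcp : c ∉ p) :
    brd (t ++ c :: p) = Nat.findGreatest (fun b => t.take b <:+ p) t.length := by
  set X := t ++ c :: p with hX
  have hn : X.length = t.length + 1 + p.length := by
    simp only [hX, List.length_append, List.length_cons]; omega
  apply Nat.le_antisymm
  · have hXne : X ≠ [] := by
      intro h
      have h2 := congrArg List.length h
      rw [hn] at h2
      simp at h2
    rcases Nat.eq_zero_or_pos (brd X) with h0 | h0
    · omega
    · have hlt : brd X < X.length := brd_lt X hXne
      obtain ⟨hbt, _, hs⟩ := sep_border_char t p c hct hcp (brd X) hlt (brd_suffix X)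
      exact Nat.le_findGreatest hbt hs
  · set g := Nat.findGreatest (fun b => t.take b <:+ p) t.length with hg
    rcases Nat.eq_zero_or_pos g with h0 | h0
    · omega
    · have hgs : t.take g <:+ p := by
        rw [hg]
        exact Nat.findGreatest_spec (P := fun b => t.take b <:+ p) (m := 0)
          (Nat.zero_le _) (by simp)
      have hgt : g ≤ t.length := Nat.findGreatest_le _
      apply brd_greatest
      · omega
      · exact sep_border_of_overlap t p c g hgt hgs

-- A's running-assignment scan over range(1, M) is findGreatest
lemma lastMatch_eq_findGreatest (cond : Int → Bool) (N : Nat) :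
    ((List.range N).map (fun k : Nat => (1 : Int) + k)).foldl
      (fun acc i => if cond i then i else acc) 0
      = (Nat.findGreatest (fun b => cond (b : Int) = true) N : Int) := by
  induction N with
  | zero => simp
  | succ N ih =>
    rw [List.range_succ, List.map_append, List.foldl_append, ih]
    simp only [List.map_cons, List.map_nil, List.foldl_cons, List.foldl_nil]
    rw [Nat.findGreatest_succ]
    have hcast : (1 : Int) + N = ((N + 1 : Nat) : Int) := by push_cast; ring
    rw [hcast]
    by_cases h : cond ((N + 1 : Nat) : Int) = true
    · rw [if_pos h, if_pos h]
    · rw [if_neg h, if_neg h]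

-- '\x00' is not a character of a Dom string
lemma sep_not_mem (s : String) (h : pvDomStr s = true) : '\x00' ∉ s.toList := by
  intro hmem
  have := List.all_eq_true.mp h _ hmem
  simp [pvDomChar, Char.toNat] at this

-- the per-pair core: A's endswith scan equals B's KMP overlap
lemma countOverlap_eq_kmp (pre suf : String) (hp : pvDomStr pre = true)
    (hsf : pvDomStr suf = true) : countOverlapA pre suf = kmpOverlap pre suf := by
  unfold countOverlapA kmpOverlap
  have hlp : PySem.Str.len pre = (pre.toList.length : Int) := by rw [PySem.Str.len_eq]
  have hlq : PySem.Str.len suf = (suf.toList.length : Int) := by rw [PySem.Str.len_eq]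
  rw [hlp, hlq, PySem.List.pyRange_one, lastMatch_eq_findGreatest]
  set p := pre.toList with hpdef
  set q := suf.toList with hqdef
  set M : Int := min (p.length : Int) (q.length : Int) with hM
  set N : Nat := (M - 1).toNat with hNdef
  have hM0 : (0 : Int) ≤ max (M - 1) 0 := le_max_right _ _
  have ht : PySem.List.slice q none (some (max (M - 1) 0)) = q.take N := by
    rw [PySem.List.slice_to q hM0]
    congr 1
    omega
  simp only [ht]
  by_cases hN : N = 0
  · rw [hN, if_pos (by simp)]
    simp
  · have hNq : N ≤ q.length - 1 := by omega
    have hNp : N ≤ p.length - 1 := by omega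
    have hql : 2 ≤ q.length := by omega
    rw [if_neg (by
      intro h
      have h2 := congrArg List.length h
      rw [List.length_take] at h2
      simp only [List.length_nil] at h2
      omega)]
    have hsep_t : '\x00' ∉ q.take N :=
      fun hm => sep_not_mem suf hsf (List.mem_of_mem_take hm)
    have hsep_p : '\x00' ∉ p := sep_not_mem pre hp
    rw [prefixFun_last _ (by simp), sep_brd _ _ _ hsep_t hsep_p]
    have htlen : (q.take N).length = N := by rw [List.length_take]; omega
    rw [htlen]
    apply congrArg
    apply findGreatest_congr'
    intro b hb
    have hslice : (PySem.Str.slice suf none (some (b : Int))).toList = q.take b := by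
      rw [PySem.Str.toList_slice, PySem.Chars.slice_eq_listSlice, PySem.List.slice_to_natCast]
    rw [PySem.Str.endswith_eq, hslice, PySem.Chars.endswith_iff,
      take_of_take q b N hb]

-- dict algebra: insert then modify at the same key is insert of the modified value
lemma insert_modify_self {κ ν : Type} [BEq κ] [LawfulBEq κ]
    (d : PySem.Dict κ ν) (k : κ) (v d0 : ν) (f : ν → ν) :
    (d.insert k v).modify k d0 f = d.insert k (f v) := by
  unfold PySem.Dict.modify
  rw [PySem.Dict.getD_insert_self, PySem.Dict.insert_insert_self]

-- A's inner loop, which mutates the dict entry at 'pre', equals B's inner loop building the row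
lemma inner_eq (pre : String) (l : List String) (hp : pvDomStr pre = true)
    (hl : ∀ x ∈ l, pvDomStr x = true)
    (d : PySem.Dict String (List String)) (row : List String) (mx : Int) :
    l.foldl
      (fun (st2 : PySem.Dict String (List String) × Int) suf =>
        if pre ≠ suf then
          let ol := countOverlapA pre suf
          if ol ≥ st2.2 then (st2.1.modify pre [] (· ++ [suf]), ol) else st2
        else st2)
      (d.insert pre row, mx)
    = (d.insert pre
        (l.foldl
          (fun (st2 : List String × Int) suf =>
            if pre ≠ suf then
              let k := kmpOverlap pre suf
              if k ≥ st2.2 then (st2.1 ++ [suf], k) else st2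
            else st2)
          (row, mx)).1,
       (l.foldl
          (fun (st2 : List String × Int) suf =>
            if pre ≠ suf then
              let k := kmpOverlap pre suf
              if k ≥ st2.2 then (st2.1 ++ [suf], k) else st2
            else st2)
          (row, mx)).2) := by
  induction l generalizing row mx with
  | nil => rfl
  | cons s t ih =>
    simp only [List.foldl_cons]
    have hs : pvDomStr s = true := hl s (by simp)
    have ht : ∀ x ∈ t, pvDomStr x = true := fun x hx => hl x (by simp [hx])
    by_cases hne : pre ≠ s
    · simp only [if_pos hne]
      rw [countOverlap_eq_kmp pre s hp hs]
      by_cases hge : kmpOverlap pre s ≥ mx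
      · simp only [if_pos hge, insert_modify_self]
        exact ih ht (row ++ [s]) (kmpOverlap pre s)
      · simp only [if_neg hge]
        exact ih ht row mx
    · simp only [if_neg hne]
      exact ih ht row mx

lemma overlap_eq_alt (patterns : List String) (hdom : ∀ x ∈ patterns, pvDomStr x = true) :
    overlap patterns = overlap_alt patterns := by
  unfold overlap overlap_alt
  congr 1
  apply congrArg
  apply PySem.List.foldl_congr_mem'
  intro pre hpre st
  exact inner_eq pre patterns (hdom pre hpre) hdom st.1 [] st.2

-- ===== VERDICT (by name: the statement is the Claim_ definition above) =====
theorem overlap_spec : Claim_equal_overlap := by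
  intro patterns hdom
  unfold Spec_overlap
  exact overlap_eq_alt patterns (fun x hx => List.all_eq_true.mp hdom x hx)
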